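-- pv_equiv track=rewrite | github.com/YunTianZhou/LeetcodeContest | Weekly Contest/Weekly Contest 495/3887. Incremental Even-Weighted Cycle Queries.py | numberOfEdgesAdded
-- ===== SOURCE A (Python) =====
-- def numberOfEdgesAdded(n: int, edges: list[list[int]]) -> int:
--     uf = list(range(n))
--     color = [0] * n
--
--     def find(x):
--         fa = uf[x]
--         if x != fa:
--             root = find(fa)
--             uf[x] = root
--             color[x] ^= color[fa]
--         return uf[x]
--
--     ans = 0
--     for a, b, w in edges:
--         i, j = find(a), find(b)
--         x = color[a] ^ color[b] ^ w
--
--         if i == j: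
--             ans += x ^ 1
--         else:
--             uf[i] = j
--             color[i] ^= x
--             ans += 1
--
--     return ans
-- ===== SOURCE B (Python) =====
-- def numberOfEdgesAdded(n: int, edges: list[list[int]]) -> int:
--     uf = list(range(n))
--     color = [0] * n
--
--     def find(x):
--         # pass 1: climb the parent chain collecting the path to the root
--         path = []
--         while uf[x] != x:
--             path.append(x)
--             x = uf[x]
--         root = x
--         # pass 2: compress back-to-front, keeping the running parity to the root
--         acc = color[root]
--         for v in reversed(path):
--             acc ^= color[v]
--             color[v] = acc
--             uf[v] = root
--         return root
--
--     ans = 0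
--     for a, b, w in edges:
--         i, j = find(a), find(b)
--         x = color[a] ^ color[b] ^ w
--         if i == j:
--             ans += x ^ 1
--         else:
--             uf[i] = j
--             color[i] ^= x
--             ans += 1
--     return ans
-- ===== Notes on version B (the rewrite author's own statement) =====
-- stated objective: alternative
-- what changed: the recursive find with on-unwind path compression is replaced by an iterative two-pass find: one loop climbs the parent chain recording the path, a second loop rewrites each path node's parent to the root and its color to the running parity, with an explicit accumulator instead of the call stack
import Mathlib
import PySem

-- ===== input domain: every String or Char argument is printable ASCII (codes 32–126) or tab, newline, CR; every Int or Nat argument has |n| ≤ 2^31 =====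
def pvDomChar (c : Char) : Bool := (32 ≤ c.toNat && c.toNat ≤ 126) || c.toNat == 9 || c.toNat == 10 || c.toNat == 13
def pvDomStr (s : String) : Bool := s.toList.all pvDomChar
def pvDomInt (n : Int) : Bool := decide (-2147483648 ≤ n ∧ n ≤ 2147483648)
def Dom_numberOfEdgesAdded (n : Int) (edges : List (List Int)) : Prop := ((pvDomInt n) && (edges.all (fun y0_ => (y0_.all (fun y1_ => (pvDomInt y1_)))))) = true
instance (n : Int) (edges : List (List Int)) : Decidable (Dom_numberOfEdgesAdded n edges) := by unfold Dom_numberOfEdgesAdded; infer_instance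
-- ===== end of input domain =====

-- B replaces A's recursive find (compression on unwind) with an iterative two-pass find
-- (climb to the root collecting the path, then rewrite parents/parities back-to-front);
-- the query loop shared by both Pythons is ported identically in each port.
-- Both Pythons mutate only their own local lists; the arguments are not mutated.

-- ===== PORT A =====
-- Python negative list index uf[a]: a + n for a < 0; exact for -n ≤ a < n (guaranteed by Pre_).
-- (both ports normalise the query endpoints once up front; inside the union-find all indices are
-- the stored parent values, which Python keeps in 0..n-1, so Nat indices are exact there)
def pyNorm (n a : Int) : Nat := (if a < 0 then a + n else a).toNat

-- fuelled transliteration of A's recursive find: fa = uf[x]; if x != fa: root = find(fa);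
-- uf[x] = root; color[x] ^= color[fa]; return uf[x]  (after the set, uf[x] IS root).
-- Python has no fuel; the fuel n.toNat is never exhausted on a run where Python returns
-- (a parent chain in a forest of n nodes has fewer than n edges).
def findA (f : Nat) (uf : List Nat) (color : List Int) (x : Nat) : Nat × List Nat × List Int :=
  match f with
  | 0 => (uf.getD x 0, uf, color)   -- out of fuel: return uf[x], no compression (unreachable in real runs)
  | f + 1 =>
    let fa := uf.getD x 0
    if x = fa then (fa, uf, color)
    else
      let r := findA f uf color fa
      let root := r.1
      let uf' := r.2.1.set x root
      let color' := r.2.2.set x (PySem.Int.bxor (r.2.2.getD x 0) (r.2.2.getD fa 0))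
      (root, uf', color')

-- the body of A's query loop, verbatim: i, j = find(a), find(b); x = color[a]^color[b]^w; …
def stepA (n : Int) (st : Int × List Nat × List Int) (e : List Int) : Int × List Nat × List Int :=
  match e with
  | [a, b, w] =>
    let ai := pyNorm n a
    let bi := pyNorm n b
    let r1 := findA n.toNat st.2.1 st.2.2 ai
    let i := r1.1
    let r2 := findA n.toNat r1.2.1 r1.2.2 bi
    let j := r2.1
    let uf2 := r2.2.1
    let color2 := r2.2.2
    let x := PySem.Int.bxor (PySem.Int.bxor (color2.getD ai 0) (color2.getD bi 0)) w
    if i = j then (st.1 + PySem.Int.bxor x 1, uf2, color2)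
    else (st.1 + 1, uf2.set i j, color2.set i (PySem.Int.bxor (color2.getD i 0) x))
  | _ => st   -- a row that is not [a,b,w] raises in Python: excluded by Pre_

def numberOfEdgesAdded (n : Int) (edges : List (List Int)) : Int :=
  (edges.foldl (stepA n) (0, List.range n.toNat, List.replicate n.toNat 0)).1

-- ===== PORT B =====
-- B's pass 1: while uf[x] != x: path.append(x); x = uf[x]  — returns (path, terminal).
def climbB (f : Nat) (uf : List Nat) (x : Nat) : List Nat × Nat :=
  match f with
  | 0 => ([], x)
  | f + 1 =>
    if uf.getD x 0 = x then ([], x)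
    else
      let r := climbB f uf (uf.getD x 0)
      (x :: r.1, r.2)

-- B's pass 2: for v in reversed(path): acc ^= color[v]; color[v] = acc; uf[v] = root.
def compressB (path : List Nat) (root : Nat) (acc : Int) (uf : List Nat) (color : List Int) :
    List Nat × List Int :=
  match path with
  | [] => (uf, color)
  | v :: rest =>
    let c := PySem.Int.bxor (color.getD v 0) acc
    compressB rest root c (uf.set v root) (color.set v c)

-- root = terminal of pass 1 (written uf[t]: at a true root uf[t] = t, so this equals Python's
-- `root = x`; the fuel-exhausted case never occurs on a run where Python B's while-loop ends).
def findB (f : Nat) (uf : List Nat) (color : List Int) (x : Nat) : Nat × List Nat × List Int :=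
  let pt := climbB f uf x
  let root := uf.getD pt.2 0
  let s := compressB pt.1.reverse root (color.getD pt.2 0) uf color
  (root, s.1, s.2)

-- B's query loop is A's query loop (Source B keeps it verbatim), calling B's find.
def stepB (n : Int) (st : Int × List Nat × List Int) (e : List Int) : Int × List Nat × List Int :=
  match e with
  | [a, b, w] =>
    let ai := pyNorm n a
    let bi := pyNorm n b
    let r1 := findB n.toNat st.2.1 st.2.2 ai
    let i := r1.1
    let r2 := findB n.toNat r1.2.1 r1.2.2 bi
    let j := r2.1
    let uf2 := r2.2.1
    let color2 := r2.2.2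
    let x := PySem.Int.bxor (PySem.Int.bxor (color2.getD ai 0) (color2.getD bi 0)) w
    if i = j then (st.1 + PySem.Int.bxor x 1, uf2, color2)
    else (st.1 + 1, uf2.set i j, color2.set i (PySem.Int.bxor (color2.getD i 0) x))
  | _ => st

def numberOfEdgesAdded_alt (n : Int) (edges : List (List Int)) : Int :=
  (edges.foldl (stepB n) (0, List.range n.toNat, List.replicate n.toNat 0)).1

-- ===== PRECONDITION & SPEC =====
-- Pre_ excludes exactly the inputs where Python raises: a row not of length 3 (unpacking
-- ValueError) or an endpoint outside Python's index range [-n, n) (IndexError).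
def Pre_numberOfEdgesAdded (n : Int) (edges : List (List Int)) : Prop :=
  ∀ e ∈ edges, e.length = 3 ∧ -n ≤ e.getD 0 0 ∧ e.getD 0 0 < n ∧ -n ≤ e.getD 1 0 ∧ e.getD 1 0 < n
instance (n : Int) (edges : List (List Int)) : Decidable (Pre_numberOfEdgesAdded n edges) := by
  unfold Pre_numberOfEdgesAdded; infer_instance

def pvWitness_numberOfEdgesAdded : Int × List (List Int) := (2, [[0, 1, 1], [0, -1, 0]])

def Spec_numberOfEdgesAdded (n : Int) (edges : List (List Int)) (out : Int) : Prop := out = numberOfEdgesAdded_alt n edges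
instance (n : Int) (edges : List (List Int)) (out : Int) : Decidable (Spec_numberOfEdgesAdded n edges out) := by unfold Spec_numberOfEdgesAdded; infer_instance

-- ===== CLAIM (what is proved, stated in full; the proofs are below) =====
def Claim_equal_numberOfEdgesAdded : Prop := ∀ (n : Int) (edges : List (List Int)), Dom_numberOfEdgesAdded n edges → Pre_numberOfEdgesAdded n edges → Spec_numberOfEdgesAdded n edges (numberOfEdgesAdded n edges)

-- ===== LEMMAS AND PROOFS =====

-- state invariant: both arrays have length nn and all parent values are < nn
def UFInv (nn : Nat) (uf : List Nat) (color : List Int) : Prop :=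
  uf.length = nn ∧ color.length = nn ∧ ∀ v ∈ uf, v < nn

-- compressB with the running accumulator made explicit (proof-only helper)
def compressAux (path : List Nat) (root : Nat) (acc : Int) (uf : List Nat) (color : List Int) :
    List Nat × List Int × Int :=
  match path with
  | [] => (uf, color, acc)
  | v :: rest =>
    let c := PySem.Int.bxor (color.getD v 0) acc
    compressAux rest root c (uf.set v root) (color.set v c)

theorem compressB_eq_aux (path : List Nat) (root : Nat) (acc : Int) (uf : List Nat)
    (color : List Int) :
    compressB path root acc uf color =
      ((compressAux path root acc uf color).1, (compressAux path root acc uf color).2.1) := by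
  induction path generalizing acc uf color with
  | nil => rfl
  | cons v rest ih => simp [compressB, compressAux, ih]

theorem compressAux_append (path : List Nat) (x root : Nat) (acc : Int) (uf : List Nat)
    (color : List Int) :
    compressAux (path ++ [x]) root acc uf color =
      (((compressAux path root acc uf color).1).set x root,
       ((compressAux path root acc uf color).2.1).set x
         (PySem.Int.bxor (((compressAux path root acc uf color).2.1).getD x 0)
           ((compressAux path root acc uf color).2.2)),
       PySem.Int.bxor (((compressAux path root acc uf color).2.1).getD x 0)
         ((compressAux path root acc uf color).2.2)) := by
  induction path generalizing acc uf color with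
  | nil => rfl
  | cons v rest ih => simp [compressAux, ih]

theorem compressAux_lengths (path : List Nat) (root : Nat) (acc : Int) (uf : List Nat)
    (color : List Int) :
    (compressAux path root acc uf color).1.length = uf.length ∧
      (compressAux path root acc uf color).2.1.length = color.length := by
  induction path generalizing acc uf color with
  | nil => exact ⟨rfl, rfl⟩
  | cons v rest ih =>
    have h := ih (PySem.Int.bxor (color.getD v 0) acc) (uf.set v root)
      (color.set v (PySem.Int.bxor (color.getD v 0) acc))
    simp only [compressAux]
    exact ⟨h.1.trans (List.length_set ..), h.2.trans (List.length_set ..)⟩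

theorem climbB_nil (f : Nat) (uf : List Nat) (x : Nat)
    (h : (climbB f uf x).1 = []) : (climbB f uf x).2 = x := by
  cases f with
  | zero => rfl
  | succ f =>
    by_cases hc : uf.getD x 0 = x
    · simp only [climbB, if_pos hc]
    · exact absurd (by simp only [climbB, if_neg hc] at h; exact h) (List.cons_ne_nil x _)

theorem climbB_cons (f : Nat) (uf : List Nat) (x : Nat)
    (h : (climbB f uf x).1 ≠ []) : ∃ p, (climbB f uf x).1 = x :: p := by
  cases f with
  | zero => exact absurd rfl h
  | succ f =>
    by_cases hc : uf.getD x 0 = x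
    · exact absurd (by simp only [climbB, if_pos hc]) h
    · exact ⟨(climbB f uf (uf.getD x 0)).1, by simp only [climbB, if_neg hc]⟩

theorem getD_mem_lt (nn : Nat) (uf : List Nat) (x : Nat) (hu : ∀ v ∈ uf, v < nn)
    (hl : uf.length = nn) (hx : x < nn) : uf.getD x 0 < nn := by
  have hx' : x < uf.length := by omega
  have : uf.getD x 0 = uf[x] := by
    simp [List.getD, List.getElem?_eq_getElem hx']
  rw [this]
  exact hu _ (List.getElem_mem hx')

theorem getD_set_self (l : List Int) (i : Nat) (v : Int) (h : i < l.length) :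
    (l.set i v).getD i 0 = v := by
  simp [List.getD, h]

-- the heart of the file: A's recursive find and B's two-pass find produce the same
-- (root, uf, color) on every in-bounds state, with the invariant and root bound preserved
theorem find_eq (nn : Nat) (f : Nat) (uf : List Nat) (color : List Int) (x : Nat)
    (hI : UFInv nn uf color) (hx : x < nn) :
    findA f uf color x = findB f uf color x ∧
      UFInv nn (findA f uf color x).2.1 (findA f uf color x).2.2 ∧
      (findA f uf color x).1 < nn := by
  induction f generalizing uf color x with
  | zero =>
    refine ⟨?_, hI, getD_mem_lt nn uf x hI.2.2 hI.1 hx⟩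
    simp only [findA, findB, climbB, compressB, List.reverse_nil]
  | succ f ih =>
    have hfa_lt : uf.getD x 0 < nn := getD_mem_lt nn uf x hI.2.2 hI.1 hx
    by_cases hfa : x = uf.getD x 0
    · have hc : uf.getD x 0 = x := hfa.symm
      refine ⟨?_, ?_, ?_⟩
      · have hA : findA (f + 1) uf color x = (uf.getD x 0, uf, color) := by
          simp only [findA, if_pos hfa]
        have hB : findB (f + 1) uf color x = (uf.getD x 0, uf, color) := by
          simp only [findB, climbB, if_pos hc, List.reverse_nil, compressB]
        rw [hA, hB]
      · simpa only [findA, if_pos hfa] using hI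
      · simpa only [findA, if_pos hfa] using hfa_lt
    · obtain ⟨heq, hI', hroot⟩ := ih uf color (uf.getD x 0) hI hfa_lt
      have hclimb : climbB (f + 1) uf x =
          ((x :: (climbB f uf (uf.getD x 0)).1), (climbB f uf (uf.getD x 0)).2) := by
        simp only [climbB, if_neg (fun h : uf.getD x 0 = x => hfa h.symm)]
      -- name the pieces of B's fuel-f find
      set pt := climbB f uf (uf.getD x 0) with hpt
      set root0 := uf.getD pt.2 0 with hroot0
      set Ax := compressAux pt.1.reverse root0 (color.getD pt.2 0) uf color with hAx
      have hBf : findB f uf color (uf.getD x 0) = (root0, Ax.1, Ax.2.1) := by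
        simp only [findB, ← hpt, ← hroot0, compressB_eq_aux, ← hAx]
      have hAf : findA f uf color (uf.getD x 0) = (root0, Ax.1, Ax.2.1) := heq.trans hBf
      -- the accumulator after compressing B's path equals the new color of fa
      have hacc : Ax.2.2 = Ax.2.1.getD (uf.getD x 0) 0 := by
        by_cases hnil : pt.1 = []
        · have ht : pt.2 = uf.getD x 0 := climbB_nil f uf (uf.getD x 0) hnil
          rw [hAx, hnil, ht]
          simp [compressAux]
        · obtain ⟨p', hp'⟩ := climbB_cons f uf (uf.getD x 0) hnil
          rw [hAx, hp']
          simp only [List.reverse_cons, compressAux_append]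
          have hlen : (compressAux p'.reverse root0 (color.getD pt.2 0) uf color).2.1.length
              = color.length :=
            (compressAux_lengths p'.reverse root0 (color.getD pt.2 0) uf color).2
          rw [getD_set_self _ _ _ (by rw [hlen, hI.2.1]; exact hfa_lt)]
      -- B at fuel f+1, fully unfolded
      have hB : findB (f + 1) uf color x =
          (root0, Ax.1.set x root0,
            Ax.2.1.set x (PySem.Int.bxor (Ax.2.1.getD x 0) (Ax.2.1.getD (uf.getD x 0) 0))) := by
        simp only [findB, hclimb, ← hroot0, compressB_eq_aux, List.reverse_cons,
          compressAux_append, ← hAx, ← hacc]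
      have hA : findA (f + 1) uf color x =
          (root0, Ax.1.set x root0,
            Ax.2.1.set x (PySem.Int.bxor (Ax.2.1.getD x 0) (Ax.2.1.getD (uf.getD x 0) 0))) := by
        simp only [findA, if_neg hfa, hAf]
      refine ⟨hA.trans hB.symm, ?_, ?_⟩
      · rw [hA]
        rw [hAf] at hI'
        refine ⟨by simpa using hI'.1, by simpa using hI'.2.1, ?_⟩
        intro v hv
        rcases List.mem_or_eq_of_mem_set hv with h | h
        · exact hI'.2.2 v h
        · subst h; rw [hAf] at hroot; exact hroot
      · rw [hA]; rw [hAf] at hroot; exact hroot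

theorem step_eq (n : Int) (nn : Nat) (hnn : nn = n.toNat) (st : Int × List Nat × List Int)
    (e : List Int) (hI : UFInv nn st.2.1 st.2.2)
    (he : e.length = 3 ∧ -n ≤ e.getD 0 0 ∧ e.getD 0 0 < n ∧ -n ≤ e.getD 1 0 ∧ e.getD 1 0 < n) :
    stepA n st e = stepB n st e ∧ UFInv nn (stepA n st e).2.1 (stepA n st e).2.2 := by
  obtain ⟨a, b, w, rfl⟩ : ∃ a b w, e = [a, b, w] := by
    rcases e with _ | ⟨a, _ | ⟨b, _ | ⟨w, _ | ⟨z, t⟩⟩⟩⟩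
    · exfalso; have h3 := he.1; simp at h3
    · exfalso; have h3 := he.1; simp at h3
    · exfalso; have h3 := he.1; simp at h3
    · exact ⟨a, b, w, rfl⟩
    · exfalso; have h3 := he.1; simp at h3; try omega
  obtain ⟨-, ha0, ha1, hb0, hb1⟩ := he
  simp only [List.getD_cons_zero, List.getD_cons_succ] at ha0 ha1 hb0 hb1
  have hai : pyNorm n a < nn := by unfold pyNorm; split <;> omega
  have hbi : pyNorm n b < nn := by unfold pyNorm; split <;> omega
  obtain ⟨h1, hI1, hi⟩ :=
    find_eq nn n.toNat st.2.1 st.2.2 (pyNorm n a) hI (hnn ▸ hai)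
  obtain ⟨h2, hI2, hj⟩ :=
    find_eq nn n.toNat (findA n.toNat st.2.1 st.2.2 (pyNorm n a)).2.1
      (findA n.toNat st.2.1 st.2.2 (pyNorm n a)).2.2 (pyNorm n b) hI1 (hnn ▸ hbi)
  constructor
  · simp only [stepA, stepB, ← h1, ← h2]
  · simp only [stepA]
    split
    · exact hI2
    · refine ⟨by simpa using hI2.1, by simpa using hI2.2.1, ?_⟩
      intro v hv
      rcases List.mem_or_eq_of_mem_set hv with h | h
      · exact hI2.2.2 v h
      · subst h; exact hj

theorem fold_eq (n : Int) (nn : Nat) (hnn : nn = n.toNat) (edges : List (List Int))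
    (st : Int × List Nat × List Int) (hI : UFInv nn st.2.1 st.2.2)
    (hp : ∀ e ∈ edges, e.length = 3 ∧ -n ≤ e.getD 0 0 ∧ e.getD 0 0 < n ∧ -n ≤ e.getD 1 0 ∧ e.getD 1 0 < n) :
    edges.foldl (stepA n) st = edges.foldl (stepB n) st := by
  induction edges generalizing st with
  | nil => rfl
  | cons e rest ih =>
    have he := hp e (List.mem_cons_self ..)
    obtain ⟨heq, hI'⟩ := step_eq n nn hnn st e hI he
    simp only [List.foldl_cons, heq]
    exact ih _ (heq ▸ hI') (fun e' h => hp e' (List.mem_cons_of_mem _ h))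

-- ===== VERDICT (by name: the statement is the Claim_ definition above) =====
theorem numberOfEdgesAdded_spec : Claim_equal_numberOfEdgesAdded := by
  intro n edges _ hpre
  unfold Spec_numberOfEdgesAdded numberOfEdgesAdded numberOfEdgesAdded_alt
  rw [fold_eq n n.toNat rfl edges _ ?_ hpre]
  refine ⟨by simp, by simp, ?_⟩
  intro v hv
  simpa using List.mem_range.mp hv
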